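-- pv_equiv track=rewrite | github.com/CodingProgrammer/HackerRank_Python | (Greedy)Chief_Hopper.py | chiefHopper
-- ===== SOURCE A (Python) =====
-- from itertools import count
--
-- def chiefHopper(arr):
--
--     for botEnergy in count(1):
--         temp = botEnergy
--         for each_height in arr:
--             if each_height > botEnergy:
--                 botEnergy -= (each_height - botEnergy)
--             else:
--                 botEnergy += (botEnergy - each_height)
--             if botEnergy < 0:
--                 break
--
--         if botEnergy >= 0:
--             return temp
-- ===== SOURCE B (Python) =====
-- def chiefHopper(arr):
--     # Backward pass: minimal required energy before each jump is
--     # max(ceil((required_after + height) / 2), 0); the start must also be >= 1.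
--     need = 0
--     for h in reversed(arr):
--         need = max(-(-(need + h) // 2), 0)
--     return max(need, 1)
-- ===== Notes on version B (the rewrite author's own statement) =====
-- stated objective: faster
-- what changed: Replaces A's unbounded linear search over candidate starting energies (each simulated over the whole list) with a single backward pass computing the minimal required energy by the ceiling recurrence need = max(ceil((need+h)/2), 0).
import Mathlib
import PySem

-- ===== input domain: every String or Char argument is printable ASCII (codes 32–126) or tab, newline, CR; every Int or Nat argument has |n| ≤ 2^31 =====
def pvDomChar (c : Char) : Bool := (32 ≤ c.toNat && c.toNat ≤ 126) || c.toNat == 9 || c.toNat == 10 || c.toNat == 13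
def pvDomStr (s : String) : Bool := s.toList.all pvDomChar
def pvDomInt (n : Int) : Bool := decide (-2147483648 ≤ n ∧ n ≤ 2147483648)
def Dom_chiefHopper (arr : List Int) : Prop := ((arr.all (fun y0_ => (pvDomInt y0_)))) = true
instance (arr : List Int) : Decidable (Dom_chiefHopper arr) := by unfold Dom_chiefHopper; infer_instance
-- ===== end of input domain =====

-- B replaces A's unbounded linear search over candidate starting energies with a
-- single backward pass (objective: faster, O(n) instead of O(answer * n)).

-- ===== PORT A =====
-- one step of the inner loop (both Python branches, in order)
def chiefStep (botEnergy h : Int) : Int :=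
  if h > botEnergy then botEnergy - (h - botEnergy) else botEnergy + (botEnergy - h)

-- the inner 'for each_height in arr' loop with its 'break' on negative energy
def chiefRun (botEnergy : Int) : List Int → Int
  | [] => botEnergy
  | h :: t =>
    let e' := chiefStep botEnergy h
    if e' < 0 then e' else chiefRun e' t

-- 'for botEnergy in count(1)': fuel is only a totality guard (proved sufficient below);
-- on fuel exhaustion we return the current candidate (never reached on any input).
def chiefSearch (arr : List Int) : Nat → Int → Int
  | 0, k => k
  | fuel + 1, k => if chiefRun k arr ≥ 0 then k else chiefSearch arr fuel (k + 1)

def chiefHopper (arr : List Int) : Int :=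
  chiefSearch arr ((arr.foldl (fun m h => max m h) 1).toNat) 1

-- ===== PORT B =====
-- backward pass: need = max(ceil((need + h) / 2), 0) over reversed(arr); start is ≥ 1
def chiefHopper_alt (arr : List Int) : Int :=
  max (arr.reverse.foldl (fun need h => max (-(PySem.Int.floordiv (-(need + h)) 2)) 0) 0) 1

-- ===== PRECONDITION & SPEC =====
def Spec_chiefHopper (arr : List Int) (out : Int) : Prop := out = chiefHopper_alt arr
instance (arr : List Int) (out : Int) : Decidable (Spec_chiefHopper arr out) := by unfold Spec_chiefHopper; infer_instance

-- ===== CLAIM (what is proved, stated in full; the proofs are below) =====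
def Claim_equal_chiefHopper : Prop := ∀ (arr : List Int), Dom_chiefHopper arr → Spec_chiefHopper arr (chiefHopper arr)

-- ===== LEMMAS AND PROOFS =====

-- proof-side form of B's backward recurrence
def chiefReq (t : List Int) : Int :=
  t.foldr (fun h need => max (-(PySem.Int.floordiv (-(need + h)) 2)) 0) 0

theorem chiefHopper_alt_eq (arr : List Int) : chiefHopper_alt arr = max (chiefReq arr) 1 := by
  unfold chiefHopper_alt chiefReq
  rw [List.foldl_reverse]

theorem ceil_half_bounds (x : Int) :
    x ≤ 2 * (-(PySem.Int.floordiv (-x) 2)) ∧ 2 * (-(PySem.Int.floordiv (-x) 2)) < x + 2 := by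
  rw [PySem.Int.floordiv_eq_ediv_of_pos (by omega)]
  omega

theorem chiefReq_nonneg (t : List Int) : 0 ≤ chiefReq t := by
  cases t with
  | nil => simp [chiefReq]
  | cons h t => simp [chiefReq]

theorem chiefStep_eq (e h : Int) : chiefStep e h = 2 * e - h := by
  unfold chiefStep; split_ifs <;> ring

theorem chiefRun_cons (e h : Int) (t : List Int) :
    chiefRun e (h :: t) = if chiefStep e h < 0 then chiefStep e h else chiefRun (chiefStep e h) t := rfl

theorem chiefRun_ok : ∀ (t : List Int) (e : Int), chiefReq t ≤ e → 0 ≤ e → 0 ≤ chiefRun e t := by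
  intro t
  induction t with
  | nil => intro e _ he; simpa [chiefRun] using he
  | cons h t ih =>
    intro e hreq he
    have hc := ceil_half_bounds (chiefReq t + h)
    have hreq' : chiefReq (h :: t) = max (-(PySem.Int.floordiv (-(chiefReq t + h)) 2)) 0 := by
      simp [chiefReq]
    rw [hreq'] at hreq
    have ht0 := chiefReq_nonneg t
    have hstep : chiefStep e h = 2 * e - h := chiefStep_eq e h
    have h1 : chiefReq t ≤ 2 * e - h := by omega
    rw [chiefRun_cons, hstep]
    have h2 : ¬ (2 * e - h < 0) := by omega
    rw [if_neg h2]
    exact ih _ h1 (by omega)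

theorem chiefRun_bad : ∀ (t : List Int) (e : Int), 0 ≤ e → e < chiefReq t → chiefRun e t < 0 := by
  intro t
  induction t with
  | nil => intro e he hlt; simp [chiefReq] at hlt; omega
  | cons h t ih =>
    intro e he hlt
    have hc := ceil_half_bounds (chiefReq t + h)
    have hreq' : chiefReq (h :: t) = max (-(PySem.Int.floordiv (-(chiefReq t + h)) 2)) 0 := by
      simp [chiefReq]
    rw [hreq'] at hlt
    have hstep : chiefStep e h = 2 * e - h := chiefStep_eq e h
    have h1 : 2 * e - h < chiefReq t := by omega
    rw [chiefRun_cons, hstep]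
    by_cases hneg : 2 * e - h < 0
    · rw [if_pos hneg]; exact hneg
    · rw [if_neg hneg]; exact ih _ (by omega) h1

theorem le_foldl_max : ∀ (t : List Int) (a : Int), a ≤ t.foldl (fun m h => max m h) a := by
  intro t
  induction t with
  | nil => intro a; simp
  | cons h t ih =>
    intro a
    simp only [List.foldl_cons]
    exact le_trans (le_max_left a h) (ih (max a h))

theorem chiefReq_le_foldl : ∀ (t : List Int) (a : Int), 1 ≤ a →
    chiefReq t ≤ t.foldl (fun m h => max m h) a := by
  intro t
  induction t with
  | nil => intro a ha; simp [chiefReq]; omega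
  | cons h t ih =>
    intro a ha
    simp only [List.foldl_cons]
    have hF := ih (max a h) (le_trans ha (le_max_left a h))
    have hhF : h ≤ (t.foldl (fun m h => max m h) (max a h)) :=
      le_trans (le_max_right a h) (le_foldl_max t (max a h))
    have haF : a ≤ (t.foldl (fun m h => max m h) (max a h)) :=
      le_trans (le_max_left a h) (le_foldl_max t (max a h))
    have hc := ceil_half_bounds (chiefReq t + h)
    have hreq' : chiefReq (h :: t) = max (-(PySem.Int.floordiv (-(chiefReq t + h)) 2)) 0 := by
      simp [chiefReq]
    rw [hreq']
    omega

theorem chiefSearch_eq (arr : List Int) :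
    ∀ (fuel : Nat) (k : Int), 1 ≤ k → k ≤ max (chiefReq arr) 1 →
      (max (chiefReq arr) 1 - k).toNat + 1 ≤ fuel →
      chiefSearch arr fuel k = max (chiefReq arr) 1 := by
  intro fuel
  induction fuel with
  | zero => intro k _ _ hf; omega
  | succ fuel ih =>
    intro k hk1 hkR hf
    set R := max (chiefReq arr) 1 with hR
    have hreq0 := chiefReq_nonneg arr
    unfold chiefSearch
    by_cases hok : chiefRun k arr ≥ 0
    · rw [if_pos hok]
      by_contra hne
      have hkR' : k < R := lt_of_le_of_ne hkR hne
      have hklt : k < chiefReq arr := by omega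
      have := chiefRun_bad arr k (by omega) hklt
      omega
    · rw [if_neg hok]
      have hkR' : k < R := by
        rcases eq_or_lt_of_le hkR with heq | hlt
        · exfalso
          have : chiefReq arr ≤ k := by omega
          have := chiefRun_ok arr k this (by omega)
          omega
        · exact hlt
      exact ih (k + 1) (by omega) (by omega) (by omega)

-- ===== VERDICT (by name: the statement is the Claim_ definition above) =====
theorem chiefHopper_spec : Claim_equal_chiefHopper := by
  intro arr _
  unfold Spec_chiefHopper
  rw [chiefHopper_alt_eq]
  unfold chiefHopper
  have hM : chiefReq arr ≤ arr.foldl (fun m h => max m h) 1 := chiefReq_le_foldl arr 1 le_rfl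
  have hM1 : (1 : Int) ≤ arr.foldl (fun m h => max m h) 1 := le_foldl_max arr 1
  have hreq0 := chiefReq_nonneg arr
  exact chiefSearch_eq arr _ 1 le_rfl (le_max_right _ _) (by omega)
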